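-- pv_equiv track=rewrite | github.com/kkaixiao/pythonalgo2 | Array_Equilibrium.py | equilibrium
-- ===== SOURCE A (Python) =====
-- def equilibrium(arr):
--
--     sum_left = arr[0]
--     sum_right = sum(arr) - arr[0]
--
--     diff = abs(sum_left - sum_right)
--     p = 0
--
--     for i in range(1, len(arr)):
--         sum_left += arr[i]
--         sum_right -= arr[i]
--
--         curr_diff = abs(sum_left - sum_right)
--
--         if diff > curr_diff:
--             diff = curr_diff
--             p = i
--
--     return diff, p+1
-- ===== SOURCE B (Python) =====
-- def equilibrium(arr):
--     # Sort-then-head: build every (|left-right|, split index) pair in one pass,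
--     # sort the pairs lexicographically, and take the first one.  Python's tuple
--     # order makes the sort pick the smallest difference, earliest index first.
--     total = sum(arr)
--     acc = 0
--     pairs = []
--     for i, x in enumerate(arr):
--         acc += x
--         pairs.append((abs(2 * acc - total), i))
--     d, p = sorted(pairs)[0]
--     return d, p + 1
-- ===== Notes on version B (the rewrite author's own statement) =====
-- stated objective: alternative
-- what changed: Replaces the fused running-sum scan that tracks a running minimum with building the full (difference, index) pair list in one pass and sorting it lexicographically, returning the head pair (no minimum is ever tracked).
import Mathlib
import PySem

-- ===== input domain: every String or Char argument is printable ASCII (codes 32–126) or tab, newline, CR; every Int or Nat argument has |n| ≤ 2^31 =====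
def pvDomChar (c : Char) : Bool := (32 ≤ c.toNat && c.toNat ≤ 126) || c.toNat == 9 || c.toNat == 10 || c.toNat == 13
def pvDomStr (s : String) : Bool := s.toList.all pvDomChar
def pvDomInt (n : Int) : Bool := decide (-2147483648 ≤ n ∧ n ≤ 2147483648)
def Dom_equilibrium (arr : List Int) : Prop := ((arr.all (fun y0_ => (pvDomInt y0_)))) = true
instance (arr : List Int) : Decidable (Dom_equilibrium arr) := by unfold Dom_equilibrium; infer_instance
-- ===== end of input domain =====

-- B builds all (|left-right|, index) pairs in one pass and sorts them lexicographically, returning the head, instead of A's running-minimum scan (alternative decomposition; a timing run measured B no faster).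

-- ===== PORT A =====
-- state: (diff, p, sum_left, sum_right)
def equilibrium (arr : List Int) : Int × Int :=
  match arr with
  | [] => (0, 0)  -- arr[0] raises IndexError in Python; excluded by Pre_
  | a0 :: _ =>
    let sum_left : Int := a0
    let sum_right : Int := arr.sum - a0
    let diff : Int := |sum_left - sum_right|
    let st := (PySem.List.pyRange 1 (arr.length : Int) 1).foldl
      (fun (s : Int × Int × Int × Int) i =>
        let sl := s.2.2.1 + PySem.List.pyGetD arr i 0
        let sr := s.2.2.2 - PySem.List.pyGetD arr i 0
        let cd := |sl - sr|
        if s.1 > cd then (cd, i, sl, sr) else (s.1, s.2.1, sl, sr))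
      (diff, 0, sum_left, sum_right)
    (st.1, st.2.1 + 1)

-- ===== PORT B =====
-- loop state: (acc, pairs); sorted(pairs) compares the Int×Int tuples in Python's
-- lexicographic tuple order, which is exactly the order of 'toLex' on Int × Int.
def equilibrium_alt (arr : List Int) : Int × Int :=
  let total : Int := arr.sum
  let st := (PySem.List.enumerate arr 0).foldl
    (fun (s : Int × List (Int × Int)) ix =>
      (s.1 + ix.2, s.2 ++ [(|2 * (s.1 + ix.2) - total|, ix.1)]))
    ((0 : Int), ([] : List (Int × Int)))
  match PySem.List.pyGet? (PySem.List.sorted st.2 (fun q => toLex q) false) 0 with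
  | some dp => (dp.1, dp.2 + 1)
  | none => (0, 0)  -- sorted([])[0] raises IndexError in Python; excluded by Pre_

-- ===== PRECONDITION & SPEC =====
-- On [] both Pythons raise IndexError (A at arr[0], B at sorted(pairs)[0]); that is all Pre_ excludes.
def Pre_equilibrium (arr : List Int) : Prop := arr ≠ []
instance (arr : List Int) : Decidable (Pre_equilibrium arr) := by unfold Pre_equilibrium; infer_instance
def pvWitness_equilibrium : List Int := ([1, 2, 3] : List Int)

def Spec_equilibrium (arr : List Int) (out : Int × Int) : Prop := out = equilibrium_alt arr
instance (arr : List Int) (out : Int × Int) : Decidable (Spec_equilibrium arr out) := by unfold Spec_equilibrium; infer_instance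

-- ===== CLAIM (what is proved, stated in full; the proofs are below) =====
def Claim_equal_equilibrium : Prop := ∀ (arr : List Int), Dom_equilibrium arr → Pre_equilibrium arr → Spec_equilibrium arr (equilibrium arr)

-- ===== LEMMAS AND PROOFS =====

-- B's pair-building fold produces exactly the table of (g k, k) pairs.
lemma pv_build_pairs (total : Int) (xs : List Int) : ∀ (s acc : Int) (l : List (Int × Int)),
    (PySem.List.enumerate xs s).foldl
      (fun (st : Int × List (Int × Int)) ix =>
        (st.1 + ix.2, st.2 ++ [(|2 * (st.1 + ix.2) - total|, ix.1)]))
      (acc, l)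
    = (acc + xs.sum,
       l ++ (List.range xs.length).map
         (fun k => (|2 * (acc + (xs.take (k + 1)).sum) - total|, s + (k : Int)))) := by
  induction xs with
  | nil => intro s acc l; simp [PySem.List.enumerate_nil]
  | cons x t ih =>
    intro s acc l
    rw [PySem.List.enumerate_cons, List.foldl_cons, ih]
    have hmap : (List.range t.length).map
        (fun k => ((|2 * ((acc + x) + (t.take (k + 1)).sum) - total|, (s + 1) + (k : Int)) : Int × Int))
        = (List.range t.length).map
        (fun k => ((|2 * (acc + ((x :: t).take ((k + 1) + 1)).sum) - total|, s + ((k + 1 : Nat) : Int)) : Int × Int)) := by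
      apply List.map_congr_left
      intro k _
      simp only [List.take_succ_cons, List.sum_cons, Prod.mk.injEq]
      exact ⟨by ring_nf, by push_cast; ring⟩
    rw [hmap]
    refine Prod.ext (by dsimp; ring) ?_
    dsimp only []
    rw [List.length_cons, List.range_succ_eq_map, List.map_cons, List.map_map,
        List.append_assoc, List.singleton_append]
    congr 1
    simp [Function.comp_def]

-- A's loop: the invariant "diff is the value at p, the first minimum so far".
lemma pv_loopA (arr : List Int) (total : Int) (g : Int → Int)
    (hg : ∀ i : Int, 0 ≤ i → i < (arr.length : Int) →
        g i = |2 * ((arr.take (i.toNat + 1)).sum) - total|) :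
    ∀ (k : Nat) (a : Int), 0 < a → a + k = (arr.length : Int) →
      ∀ (p diff sl : Int), 0 ≤ p → p < a → diff = g p →
      (∀ j : Int, 0 ≤ j → j < a → g p ≤ g j) →
      (∀ j : Int, 0 ≤ j → j < p → g p < g j) →
      sl = (arr.take a.toNat).sum →
      (let st := (PySem.List.pyRange a (arr.length : Int) 1).foldl
          (fun (s : Int × Int × Int × Int) i =>
            let sl := s.2.2.1 + PySem.List.pyGetD arr i 0
            let sr := s.2.2.2 - PySem.List.pyGetD arr i 0
            let cd := |sl - sr|
            if s.1 > cd then (cd, i, sl, sr) else (s.1, s.2.1, sl, sr))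
          (diff, p, sl, total - sl);
        st.1 = g st.2.1 ∧ 0 ≤ st.2.1 ∧ st.2.1 < (arr.length : Int) ∧
        (∀ j : Int, 0 ≤ j → j < (arr.length : Int) → g st.2.1 ≤ g j) ∧
        (∀ j : Int, 0 ≤ j → j < st.2.1 → g st.2.1 < g j)) := by
  intro k
  induction k with
  | zero =>
    intro a ha hlen p diff sl hp0 hpa hd hmin hfirst _
    have : PySem.List.pyRange a (arr.length : Int) 1 = [] :=
      PySem.List.pyRange_one_eq_nil (by omega)
    refine ⟨?_, ?_, ?_, ?_, ?_⟩ <;> simp [this, hd]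
    · omega
    · omega
    · intro j h1 h2; exact hmin j h1 (by omega)
    · intro j h1 h2; exact hfirst j h1 h2
  | succ k ih =>
    intro a ha hlen p diff sl hp0 hpa hd hmin hfirst hsl
    have hlt : a < (arr.length : Int) := by omega
    rw [PySem.List.pyRange_one_cons hlt]
    have hget : PySem.List.pyGetD arr a 0 = arr[a.toNat]'(by omega) :=
      PySem.List.pyGetD_eq_getElem arr 0 (by omega) hlt
    have hsl' : sl + PySem.List.pyGetD arr a 0 = (arr.take (a.toNat + 1)).sum := by
      rw [hget, hsl, List.sum_take_succ arr a.toNat (by omega)]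
    have hcd : |sl + PySem.List.pyGetD arr a 0 - (total - sl - PySem.List.pyGetD arr a 0)| = g a := by
      rw [hg a (by omega) hlt]
      have harg : sl + PySem.List.pyGetD arr a 0 - (total - sl - PySem.List.pyGetD arr a 0)
          = 2 * (sl + PySem.List.pyGetD arr a 0) - total := by ring
      rw [harg, hsl']
    simp only [List.foldl_cons]
    have hnext : (a + 1).toNat = a.toNat + 1 := by omega
    by_cases hc : g a < g p
    · have hb : diff > |sl + PySem.List.pyGetD arr a 0 - (total - sl - PySem.List.pyGetD arr a 0)| := by
        rw [hcd, hd]; exact hc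
      simp only [hb, if_pos]
      have := ih (a + 1) (by omega) (by omega)
        a ( |sl + PySem.List.pyGetD arr a 0 - (total - sl - PySem.List.pyGetD arr a 0)| )
        (sl + PySem.List.pyGetD arr a 0) (by omega) (by omega) hcd
        (by intro j h1 h2
            rcases lt_or_ge j a with hja | hja
            · have := hmin j h1 (by omega); omega
            · have : j = a := by omega
              simp [this])
        (by intro j h1 h2
            have := hmin j h1 (by omega); omega)
        (by rw [hnext]; exact hsl')
      simpa [sub_sub] using this
    · have hb : ¬ diff > |sl + PySem.List.pyGetD arr a 0 - (total - sl - PySem.List.pyGetD arr a 0)| := by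
        rw [hcd, hd]; omega
      simp only [hb, if_false]
      have := ih (a + 1) (by omega) (by omega)
        p diff (sl + PySem.List.pyGetD arr a 0) hp0 (by omega) hd
        (by intro j h1 h2
            rcases lt_or_ge j a with hja | hja
            · exact hmin j h1 hja
            · have : j = a := by omega
              rw [this]; omega)
        hfirst
        (by rw [hnext]; exact hsl')
      simpa [sub_sub] using this

-- ===== VERDICT (by name: the statement is the Claim_ definition above) =====
theorem equilibrium_spec : Claim_equal_equilibrium := by
  intro arr _ hpre
  unfold Spec_equilibrium equilibrium equilibrium_alt
  match harr : arr with
  | [] => exact absurd rfl hpre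
  | a0 :: t =>
    simp only []
    set n : Int := ((a0 :: t).length : Int) with hn
    have hlen : (a0 :: t).length = t.length + 1 := rfl
    set total : Int := (a0 :: t).sum with htot
    set g : Int → Int := fun i => |2 * (((a0 :: t).take (i.toNat + 1)).sum) - total| with hgdef
    have hg : ∀ i : Int, 0 ≤ i → i < n → g i = |2 * (((a0 :: t).take (i.toNat + 1)).sum) - total| :=
      fun i _ _ => rfl
    -- B's pairs table
    have hpairs : ((PySem.List.enumerate (a0 :: t) 0).foldl
        (fun (st : Int × List (Int × Int)) ix =>
          (st.1 + ix.2, st.2 ++ [(|2 * (st.1 + ix.2) - total|, ix.1)]))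
        ((0 : Int), ([] : List (Int × Int)))).2
        = (List.range (a0 :: t).length).map (fun (k : Nat) => Prod.mk (g (k : Int)) ((k : Int))) := by
      rw [pv_build_pairs]
      simp only [List.nil_append]
      apply List.map_congr_left
      intro k hk
      simp only [List.mem_range] at hk
      simp [hgdef, Int.toNat_natCast]
    set pairs := ((PySem.List.enumerate (a0 :: t) 0).foldl
        (fun (st : Int × List (Int × Int)) ix =>
          (st.1 + ix.2, st.2 ++ [(|2 * (st.1 + ix.2) - total|, ix.1)]))
        ((0 : Int), ([] : List (Int × Int)))).2 with hpdef
    -- the sorted list is nonempty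
    have hne : PySem.List.sorted pairs (fun q => toLex q) false ≠ [] := by
      intro hnil
      rw [PySem.List.sorted_eq_nil_iff, hpairs] at hnil
      simp at hnil
    obtain ⟨m, tl, hsorted⟩ : ∃ m tl, PySem.List.sorted pairs (fun q => toLex q) false = m :: tl :=
      match h : PySem.List.sorted pairs (fun q => toLex q) false with
      | [] => absurd h hne
      | m :: tl => ⟨m, tl, rfl⟩
    have hmin_m : ∀ y ∈ pairs, toLex m ≤ toLex y :=
      PySem.List.key_head_sorted_le _ _ hsorted
    have hm_mem : m ∈ pairs := by
      have : m ∈ PySem.List.sorted pairs (fun q => toLex q) false := by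
        rw [hsorted]; exact List.mem_cons_self
      rwa [PySem.List.mem_sorted] at this
    obtain ⟨q, hq, hmq⟩ : ∃ q : Nat, q < (a0 :: t).length ∧ m = (g (q : Int), (q : Int)) := by
      rw [hpairs] at hm_mem
      obtain ⟨k, hk, hkm⟩ := List.mem_map.mp hm_mem
      exact ⟨k, List.mem_range.mp hk, hkm.symm⟩
    -- A's loop result
    have hg0 : |a0 - (total - a0)| = g 0 := by
      rw [hg 0 le_rfl (by rw [hn, hlen]; push_cast; omega)]
      simp only [Int.toNat_zero, zero_add, List.take_succ_cons, List.take_zero,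
        List.sum_cons, List.sum_nil, add_zero]
      congr 1
      ring
    have hn1 : (1 : Int) ≤ n := by rw [hn, hlen]; push_cast; omega
    have hloop := pv_loopA (a0 :: t) total g hg (n - 1).toNat 1 (by omega)
      (by omega)
      0 (|a0 - (total - a0)|) a0 le_rfl (by omega) hg0
      (by intro j h1 h2
          have : j = 0 := by omega
          simp [this])
      (by intro j h1 h2; omega)
      (by simp)
    rw [show ((a0 :: t).length : Int) = n from hn.symm] at hloop
    set st := (PySem.List.pyRange 1 n 1).foldl
        (fun (s : Int × Int × Int × Int) i =>
          let sl := s.2.2.1 + PySem.List.pyGetD (a0 :: t) i 0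
          let sr := s.2.2.2 - PySem.List.pyGetD (a0 :: t) i 0
          let cd := |sl - sr|
          if s.1 > cd then (cd, i, sl, sr) else (s.1, s.2.1, sl, sr))
        (|a0 - (total - a0)|, 0, a0, total - a0) with hstdef
    obtain ⟨hst1, hP0, hPn, hPmin, hPfirst⟩ := hloop
    set P : Int := st.2.1 with hPdef
    -- (g P, P) is in pairs
    have hP_mem : (g P, P) ∈ pairs := by
      rw [hpairs]
      refine List.mem_map.mpr ⟨P.toNat, List.mem_range.mpr (by omega), ?_⟩
      have : ((P.toNat : Nat) : Int) = P := by omega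
      rw [this]
    -- lex antisymmetry pins m = (g P, P)
    have h1 : toLex m ≤ toLex ((g P, P) : Int × Int) := hmin_m _ hP_mem
    have h2 : toLex ((g P, P) : Int × Int) ≤ toLex m := by
      rw [hmq]
      rcases lt_or_eq_of_le (hPmin (q : Int) (by omega) (by rw [hn]; exact_mod_cast hq)) with hlt | heq
      · exact Prod.Lex.le_iff.mpr (Or.inl hlt)
      · refine Prod.Lex.le_iff.mpr (Or.inr ⟨heq, ?_⟩)
        by_contra hqP
        push Not at hqP
        have := hPfirst (q : Int) (by omega) hqP
        omega
    have hmP : m = ((g P, P) : Int × Int) := by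
      have h := le_antisymm h1 h2
      exact Prod.ext (congrArg Prod.fst h) (congrArg Prod.snd h)
    rw [hsorted]
    show (st.1, st.2.1 + 1) = match PySem.List.pyGet? (m :: tl) 0 with
      | some dp => (dp.1, dp.2 + 1)
      | none => ((0 : Int), (0 : Int))
    have hget0 : PySem.List.pyGet? (m :: tl) 0 = some m := by
      simp [PySem.List.pyGet?, PySem.List.pyIdx?]
    rw [hget0]
    simp only []
    rw [hmP, hst1]
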